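-- pv_equiv track=rewrite | github.com/kalment1982/cardgames | rl_training/state_encoder.py | _count_trump_tractors
-- ===== SOURCE A (Python) =====
-- def _count_trump_tractors(
--     face_counts: dict[int, int], trump_suit: str, level_rank: str
-- ) -> int:
--     """Count the number of trump tractors (consecutive pairs) in hand.
--
--     This is a simplified heuristic: we look for runs of >= 2 consecutive
--     paired trump faces in the standard trump ordering.
--     """
--     if len(face_counts) < 2:
--         return 0
--
--     # Build the ordered list of trump face indices that have pairs
--     paired_faces = sorted(fi for fi, cnt in face_counts.items() if cnt >= 2)
--     if len(paired_faces) < 2: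
--         return 0
--
--     # For simplicity, count runs of consecutive face indices as tractors.
--     # This is an approximation — the real tractor logic accounts for
--     # level-rank gaps in the trump sequence, but for an observation
--     # feature this is sufficient.
--     tractor_count = 0
--     run_len = 1
--     for i in range(1, len(paired_faces)):
--         if paired_faces[i] == paired_faces[i - 1] + 1:
--             run_len += 1
--         else:
--             if run_len >= 2:
--                 tractor_count += run_len - 1
--             run_len = 1
--     if run_len >= 2:
--         tractor_count += run_len - 1
--     return tractor_count
-- ===== SOURCE B (Python) =====
-- def _count_trump_tractors(
--     face_counts: dict[int, int], trump_suit: str, level_rank: str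
-- ) -> int:
--     """Count trump tractors: number of faces f with a pair such that f+1 also has a pair.
--
--     Each run of L consecutive paired faces contains exactly L-1 such faces,
--     which is what the run-scan in the original sums; so no sorting is needed.
--     """
--     paired = {fi for fi, cnt in face_counts.items() if cnt >= 2}
--     return sum(1 for f in paired if f + 1 in paired)
-- ===== Notes on version B (the rewrite author's own statement) =====
-- stated objective: simpler
-- what changed: Replaces the sort-then-run-scan (with its two early-return guards) by a single set of paired faces and a count of faces f whose successor f+1 is also paired, using the identity that a run of L consecutive paired faces contributes exactly L-1 both ways.
import Mathlib
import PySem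

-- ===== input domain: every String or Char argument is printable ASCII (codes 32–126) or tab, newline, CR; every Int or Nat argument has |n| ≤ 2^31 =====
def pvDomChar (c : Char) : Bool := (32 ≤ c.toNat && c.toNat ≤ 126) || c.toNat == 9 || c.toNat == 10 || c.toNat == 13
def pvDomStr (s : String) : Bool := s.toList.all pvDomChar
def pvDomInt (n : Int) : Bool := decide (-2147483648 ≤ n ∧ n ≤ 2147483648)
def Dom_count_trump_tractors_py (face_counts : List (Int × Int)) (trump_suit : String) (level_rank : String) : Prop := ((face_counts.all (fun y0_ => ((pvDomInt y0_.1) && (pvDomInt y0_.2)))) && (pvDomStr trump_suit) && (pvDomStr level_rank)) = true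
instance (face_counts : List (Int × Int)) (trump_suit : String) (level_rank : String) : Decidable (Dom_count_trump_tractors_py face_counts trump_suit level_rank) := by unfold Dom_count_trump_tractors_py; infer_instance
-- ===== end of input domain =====

-- B replaces A's sort + run-length scan by a set of paired faces and a count of
-- faces whose successor is also paired (simpler; same return value on every dict).

-- ===== PORT A =====
def count_trump_tractors_py (face_counts : List (Int × Int)) (trump_suit : String) (level_rank : String) : Int :=
  if face_counts.length < 2 then 0
  else
    let paired_faces : List Int :=
      PySem.List.sorted (face_counts.filterMap (fun p => if p.2 ≥ 2 then some p.1 else none)) (fun x => x) false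
    if paired_faces.length < 2 then 0
    else
      let st : Int × Int :=
        (PySem.List.pyRange 1 (paired_faces.length : Int) 1).foldl
          (fun (st : Int × Int) i =>
            if PySem.List.pyGetD paired_faces i 0 = PySem.List.pyGetD paired_faces (i - 1) 0 + 1 then
              (st.1, st.2 + 1)
            else
              (if st.2 ≥ 2 then st.1 + (st.2 - 1) else st.1, 1))
          (0, 1)
      if st.2 ≥ 2 then st.1 + (st.2 - 1) else st.1

-- ===== PORT B =====
def count_trump_tractors_py_alt (face_counts : List (Int × Int)) (trump_suit : String) (level_rank : String) : Int :=
  let paired : PySem.Set Int :=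
    PySem.Set.ofList (face_counts.filterMap (fun p => if p.2 ≥ 2 then some p.1 else none))
  -- sum(1 for f in paired if f + 1 in paired): a 0/1-sum over the set, order-independent
  paired.foldl (fun acc f => if PySem.Set.contains paired (f + 1) then acc + 1 else acc) 0

-- ===== PRECONDITION & SPEC =====
-- Pre_ excludes association lists with a duplicate key: those do not denote a Python
-- dict (A's declared parameter type), so neither behaviour there is specified.
def Pre_count_trump_tractors_py (face_counts : List (Int × Int)) (trump_suit : String) (level_rank : String) : Prop :=
  (face_counts.map Prod.fst).Nodup
instance (face_counts : List (Int × Int)) (trump_suit : String) (level_rank : String) : Decidable (Pre_count_trump_tractors_py face_counts trump_suit level_rank) := by unfold Pre_count_trump_tractors_py; infer_instance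

def pvWitness_count_trump_tractors_py : (List (Int × Int)) × String × String :=
  ([(3, 2), (4, 2), (6, 1), (7, 2)], "S", "2")

def Spec_count_trump_tractors_py (face_counts : List (Int × Int)) (trump_suit : String) (level_rank : String) (out : Int) : Prop := out = count_trump_tractors_py_alt face_counts trump_suit level_rank
instance (face_counts : List (Int × Int)) (trump_suit : String) (level_rank : String) (out : Int) : Decidable (Spec_count_trump_tractors_py face_counts trump_suit level_rank out) := by unfold Spec_count_trump_tractors_py; infer_instance

-- ===== CLAIM (what is proved, stated in full; the proofs are below) =====
def Claim_equal_count_trump_tractors_py : Prop := ∀ (face_counts : List (Int × Int)) (trump_suit : String) (level_rank : String), Dom_count_trump_tractors_py face_counts trump_suit level_rank → Pre_count_trump_tractors_py face_counts trump_suit level_rank → Spec_count_trump_tractors_py face_counts trump_suit level_rank (count_trump_tractors_py face_counts trump_suit level_rank)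


-- ===== LEMMAS AND PROOFS =====

/-- Number of adjacent (a, a+1) steps in a list, structurally. -/
def pvAdj : List Int → Int
  | x :: y :: t => (if y = x + 1 then 1 else 0) + pvAdj (y :: t)
  | _ => 0

theorem pvAdj_short (l : List Int) (h : l.length ≤ 1) : pvAdj l = 0 := by
  match l, h with
  | [], _ => rfl
  | [_], _ => rfl

-- A's index loop plus the final flush computes tc + (rl - 1) + pvAdj of the remaining suffix.
theorem pvLoopA (n : Nat) : ∀ (a : Nat) (L : List Int) (tc rl : Int), 1 ≤ rl → 1 ≤ a →
    a + n = L.length →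
    (let r := (PySem.List.pyRange (a : Int) (L.length : Int) 1).foldl
        (fun (st : Int × Int) i =>
          if PySem.List.pyGetD L i 0 = PySem.List.pyGetD L (i - 1) 0 + 1 then (st.1, st.2 + 1)
          else (if st.2 ≥ 2 then st.1 + (st.2 - 1) else st.1, 1)) (tc, rl)
      if r.2 ≥ 2 then r.1 + (r.2 - 1) else r.1)
      = tc + (rl - 1) + pvAdj (L.drop (a - 1)) := by
  induction n with
  | zero =>
    intro a L tc rl hrl ha hlen
    rw [PySem.List.pyRange_one_eq_nil (by omega)]
    simp only [List.foldl_nil]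
    rw [pvAdj_short (L.drop (a - 1)) (by simp [List.length_drop]; omega)]
    split <;> omega
  | succ n ih =>
    intro a L tc rl hrl ha hlen
    have haL : a < L.length := by omega
    have ha1 : a - 1 < L.length := by omega
    rw [PySem.List.pyRange_one_cons (by exact_mod_cast haL), List.foldl_cons]
    have hcast : (a : Int) - 1 = ((a - 1 : Nat) : Int) := by omega
    rw [hcast, PySem.List.pyGetD_natCast, PySem.List.pyGetD_natCast,
      List.getD_eq_getElem L 0 haL, List.getD_eq_getElem L 0 ha1]
    have hdrop1 : L.drop (a - 1) = L[a - 1] :: L.drop a := by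
      have := List.drop_eq_getElem_cons ha1
      rwa [Nat.sub_add_cancel ha] at this
    have hdrop2 : L.drop a = L[a] :: L.drop (a + 1) := List.drop_eq_getElem_cons haL
    split
    case isTrue h =>
      have h2 := ih (a + 1) L tc (rl + 1) (by omega) (by omega) (by omega)
      simp only [Nat.add_sub_cancel] at h2
      push_cast at h2
      dsimp only
      rw [h2, hdrop1, hdrop2, pvAdj, ← hdrop2, if_pos h]
      omega
    case isFalse h =>
      have h2 := ih (a + 1) L (if rl ≥ 2 then tc + (rl - 1) else tc) 1 (by omega) (by omega)
        (by omega)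
      simp only [Nat.add_sub_cancel] at h2
      push_cast at h2
      dsimp only
      rw [h2, hdrop1, hdrop2, pvAdj, ← hdrop2, if_neg h]
      split <;> omega

-- On a strictly increasing list, the successor count equals the adjacency count.
theorem pvCountP_eq_adj : ∀ (L : List Int), L.Pairwise (· < ·) →
    ((L.countP (fun f => decide ((f + 1) ∈ L)) : Nat) : Int) = pvAdj L := by
  intro L
  induction L with
  | nil => intro _; rfl
  | cons x t ih =>
    intro hp
    have hxt : ∀ y ∈ t, x < y := fun y hy => (List.pairwise_cons.mp hp).1 y hy
    have hpt : t.Pairwise (· < ·) := (List.pairwise_cons.mp hp).2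
    rw [List.countP_cons]
    have hcongr : t.countP (fun f => decide ((f + 1) ∈ x :: t)) =
        t.countP (fun f => decide ((f + 1) ∈ t)) := by
      apply List.countP_congr
      intro f hf
      have hfx : x < f := hxt f hf
      simp only [List.mem_cons, decide_eq_true_eq]
      constructor
      · rintro (h | h)
        · omega
        · exact h
      · exact Or.inr
    rw [hcongr]
    have hx : (decide ((x + 1) ∈ x :: t)) = decide ((x + 1) ∈ t) := by
      simp only [List.mem_cons, decide_eq_decide]
      constructor
      · rintro (h | h)
        · omega
        · exact h
      · exact Or.inr
    rw [hx]
    match t, hxt, hpt, ih with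
    | [], _, _, _ => simp [pvAdj]
    | y :: t', hxt, hpt, ih =>
      have hyt' : ∀ z ∈ t', y < z := fun z hz => (List.pairwise_cons.mp hpt).1 z hz
      have hmem : (x + 1) ∈ y :: t' ↔ y = x + 1 := by
        constructor
        · intro h
          rcases List.mem_cons.mp h with h | h
          · omega
          · have h1 : x < y := hxt y List.mem_cons_self
            have h2 : y < x + 1 := hyt' _ h
            omega
        · intro h; exact List.mem_cons.mpr (Or.inl h.symm)
      have hih := ih hpt
      rw [pvAdj]
      by_cases hy : y = x + 1
      · have hd : decide ((x + 1) ∈ y :: t') = true := by simp [hy]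
        rw [hd, if_pos hy]
        push_cast
        rw [hih]
        simp [add_comm]
      · have hd : decide ((x + 1) ∈ y :: t') = false := by simp [hmem, hy]
        rw [hd, if_neg hy]
        push_cast
        rw [hih]
        simp

theorem pvOfList_nodup_aux : ∀ (xs s : List Int), (∀ x ∈ xs, x ∉ s) → xs.Nodup →
    xs.foldl PySem.Set.add s = s ++ xs := by
  intro xs
  induction xs with
  | nil => intro s _ _; simp
  | cons x t ih =>
    intro s hdisj hnd
    rw [List.foldl_cons]
    have hadd : PySem.Set.add s x = s ++ [x] := by
      have : s.contains x = false := by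
        simp only [List.contains_eq_mem, decide_eq_false_iff_not]
        exact hdisj x List.mem_cons_self
      show (if s.contains x then s else s ++ [x]) = s ++ [x]
      rw [this]; rfl
    rw [hadd, ih (s ++ [x]) ?_ (List.nodup_cons.mp hnd).2]
    · simp
    · intro z hz
      simp only [List.mem_append, List.mem_singleton]
      rintro (h | h)
      · exact hdisj z (List.mem_cons_of_mem x hz) h
      · exact (List.nodup_cons.mp hnd).1 (h ▸ hz)

theorem pvOfList_nodup (xs : List Int) (h : xs.Nodup) : PySem.Set.ofList xs = xs := by
  rw [PySem.Set.ofList_eq_foldl, pvOfList_nodup_aux xs [] (by simp) h]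
  rfl

theorem pvFiltered_eq (fc : List (Int × Int)) :
    fc.filterMap (fun p => if p.2 ≥ 2 then some p.1 else none) =
      (fc.filter (fun p => decide (p.2 ≥ 2))).map Prod.fst := by
  induction fc with
  | nil => rfl
  | cons p t ih =>
    by_cases h : p.2 ≥ 2 <;> simp [h, ih]

theorem pvFiltered_nodup (fc : List (Int × Int)) (h : (fc.map Prod.fst).Nodup) :
    (fc.filterMap (fun p => if p.2 ≥ 2 then some p.1 else none)).Nodup := by
  rw [pvFiltered_eq]
  exact h.sublist (List.Sublist.map Prod.fst List.filter_sublist)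

-- ===== VERDICT (by name: the statement is the Claim_ definition above) =====
theorem count_trump_tractors_py_spec : Claim_equal_count_trump_tractors_py := by
  intro fc ts lr _hdom hpre
  unfold Spec_count_trump_tractors_py
  set F := fc.filterMap (fun p => if p.2 ≥ 2 then some p.1 else none) with hFdef
  have hFnd : F.Nodup := pvFiltered_nodup fc hpre
  have hofl : PySem.Set.ofList F = F := pvOfList_nodup F hFnd
  set L := PySem.List.sorted F (fun x => x) false with hLdef
  have hperm : L.Perm F := PySem.List.sorted_perm F (fun x => x) false
  have hlt : L.Pairwise (· < ·) := by
    have := PySem.List.sorted_ofList_pairwise_lt F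
    rwa [hofl] at this
  -- B computes pvAdj L
  have hB : count_trump_tractors_py_alt fc ts lr = pvAdj L := by
    show (PySem.Set.ofList F).foldl
        (fun acc f => if PySem.Set.contains (PySem.Set.ofList F) (f + 1) then acc + 1 else acc) 0
        = pvAdj L
    rw [hofl]
    show F.foldl (fun acc f => if F.contains (f + 1) then acc + 1 else acc) 0 = pvAdj L
    rw [PySem.List.foldl_if_add_one (fun f => F.contains (f + 1)) F 0]
    have h1 : F.countP (fun f => F.contains (f + 1)) =
        L.countP (fun f => decide ((f + 1) ∈ L)) := by
      rw [hperm.symm.countP_eq]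
      apply List.countP_congr
      intro f _
      simp only [List.contains_eq_mem, decide_eq_true_eq]
      exact hperm.symm.mem_iff
    rw [h1, pvCountP_eq_adj L hlt]
    ring
  rw [hB]
  -- A computes pvAdj L too
  unfold count_trump_tractors_py
  split
  case isTrue h =>
    have hFlen : F.length ≤ fc.length := List.length_filterMap_le _ _
    have hL1 : L.length ≤ 1 := by
      rw [hperm.length_eq]; omega
    rw [pvAdj_short L hL1]
  case isFalse h =>
    dsimp only
    split
    case isTrue h2 =>
      have h2' : L.length < 2 := by rw [hLdef]; exact h2
      rw [pvAdj_short L (by omega)]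
    case isFalse h2 =>
      have h2' : ¬ L.length < 2 := by rw [hLdef]; exact h2
      have hlen : 1 + (L.length - 1) = L.length := by omega
      have hthis := pvLoopA (L.length - 1) 1 L 0 1 (by omega) (by omega) hlen
      push_cast at hthis
      rw [← hLdef, hthis]
      simp
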